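-- pv_equiv track=rewrite | github.com/jdhuntington/advent2024 | day04/problem1.py | rotate_45
-- ===== SOURCE A (Python) =====
-- def rotate_45(lines):
--     if len(lines) == 0:
--         return []
--
--     line_length = len(lines[0])
--     result = [[' '] * line_length for _ in range(line_length + len(lines) - 1)]
--
--     for col_index in range(line_length):
--         for row_index in range(len(lines)):
--             result[row_index + col_index][col_index] = lines[row_index][col_index]
--
--     return [''.join(chars) for chars in result]
-- ===== SOURCE B (Python) =====
-- def rotate_45(lines):
--     if len(lines) == 0:
--         return []
--     n = len(lines)
--     w = len(lines[0])
--     return [''.join(lines[R - C][C] if 0 <= R - C < n else ' ' for C in range(w))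
--             for R in range(w + n - 1)]
-- ===== Notes on version B (the rewrite author's own statement) =====
-- stated objective: simpler
-- what changed: Replaces the preallocated mutable 2D buffer and scatter writes with a direct gather: each output cell (R,C) reads lines[R-C][C] (or a space when out of range), built as a comprehension with no intermediate grid.
import Mathlib
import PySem

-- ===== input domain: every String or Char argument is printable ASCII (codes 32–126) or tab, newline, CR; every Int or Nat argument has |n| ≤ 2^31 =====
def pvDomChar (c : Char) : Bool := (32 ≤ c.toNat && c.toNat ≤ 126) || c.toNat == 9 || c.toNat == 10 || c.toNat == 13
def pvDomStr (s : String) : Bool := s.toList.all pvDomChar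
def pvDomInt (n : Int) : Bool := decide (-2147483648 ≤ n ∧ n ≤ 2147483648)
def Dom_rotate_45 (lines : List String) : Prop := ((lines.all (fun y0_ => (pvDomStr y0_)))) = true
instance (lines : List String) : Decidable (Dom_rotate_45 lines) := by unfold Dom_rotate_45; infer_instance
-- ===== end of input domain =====

-- B replaces A's preallocated mutable buffer + scatter writes by a direct gather of each
-- output cell (objective: simpler); equal on Pre_ (A raises IndexError off it).

-- ===== PORT A =====
-- result[i][j] = ch  (Python list assignment; in A the indices are always in range)
def pvWriteCell (g : List (List Char)) (i j : Nat) (ch : Char) : List (List Char) :=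
  g.set i ((g.getD i []).set j ch)

def rotate_45 (lines : List String) : List String :=
  if lines.length = 0 then []
  else
    let w := (lines.headD "").toList.length
    let init : List (List Char) :=
      List.replicate (w + lines.length - 1) (List.replicate w ' ')
    let final : List (List Char) :=
      (List.range w).foldl (fun g c =>
        (List.range lines.length).foldl (fun g r =>
          pvWriteCell g (r + c) c ((lines.getD r "").toList.getD c ' ')) g) init
    final.map (fun chars => String.ofList chars)

-- ===== PORT B =====
def rotate_45_alt (lines : List String) : List String :=
  if lines.length = 0 then []
  else
    let n := lines.length
    let w := (lines.headD "").toList.length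
    (List.range (w + n - 1)).map (fun R =>
      String.ofList ((List.range w).map (fun C =>
        if C ≤ R ∧ R - C < n then (lines.getD (R - C) "").toList.getD C ' ' else ' ')))

-- ===== PRECONDITION & SPEC =====
-- Pre_ excludes exactly the ragged inputs on which Python A raises IndexError
-- (some line shorter than the first line); A returns normally everywhere else.
def Pre_rotate_45 (lines : List String) : Prop :=
  ∀ s ∈ lines, (lines.headD "").toList.length ≤ s.toList.length
instance (lines : List String) : Decidable (Pre_rotate_45 lines) := by unfold Pre_rotate_45; infer_instance
def pvWitness_rotate_45 : List String := ["ab", "xyz"]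

def Spec_rotate_45 (lines : List String) (out : List String) : Prop := out = rotate_45_alt lines
instance (lines : List String) (out : List String) : Decidable (Spec_rotate_45 lines out) := by unfold Spec_rotate_45; infer_instance

-- ===== CLAIM (what is proved, stated in full; the proofs are below) =====
def Claim_equal_rotate_45 : Prop := ∀ (lines : List String), Dom_rotate_45 lines → Pre_rotate_45 lines → Spec_rotate_45 lines (rotate_45 lines)

-- ===== LEMMAS AND PROOFS =====

-- cell lookup in a grid
def pvCell (g : List (List Char)) (R C : Nat) : Char := (g.getD R []).getD C ' '

theorem length_writeCell (g : List (List Char)) (i j : Nat) (ch : Char) :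
    (pvWriteCell g i j ch).length = g.length := by
  simp [pvWriteCell]

theorem rowlen_writeCell (g : List (List Char)) (i j : Nat) (ch : Char) (R : Nat) :
    ((pvWriteCell g i j ch).getD R []).length = (g.getD R []).length := by
  unfold pvWriteCell
  simp only [List.getD_eq_getElem?_getD, List.getElem?_set]
  split_ifs with h1 h2
  · subst h1; simp [List.getElem?_eq_getElem h2]
  · subst h1
    rw [List.getElem?_eq_none (by omega)]
  · rfl

theorem cell_writeCell (g : List (List Char)) (i j : Nat) (ch : Char) (R C : Nat)
    (hi : i < g.length) (hj : j < (g.getD i []).length) :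
    pvCell (pvWriteCell g i j ch) R C =
      if R = i ∧ C = j then ch else pvCell g R C := by
  unfold pvCell pvWriteCell
  simp only [List.getD_eq_getElem?_getD] at hj ⊢
  simp only [List.getElem?_set]
  by_cases hR : R = i
  · subst hR
    simp only [if_pos hi, true_and]
    by_cases hC : C = j
    · subst hC
      simp [List.getElem?_set_self hj]
    · simp [hC, List.getElem?_set_ne (by omega : j ≠ C)]
  · rw [if_neg (fun h : i = R => hR h.symm), if_neg (fun h : R = i ∧ C = j => hR h.1)]

-- the character scattered by A / gathered by B
def pvCh (lines : List String) (r c : Nat) : Char := (lines.getD r "").toList.getD c ' '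

-- inner loop of A, one column
def pvInner (lines : List String) (c k : Nat) (g : List (List Char)) : List (List Char) :=
  (List.range k).foldl (fun g r => pvWriteCell g (r + c) c (pvCh lines r c)) g

def pvOuter (lines : List String) (n w m : Nat) (g : List (List Char)) : List (List Char) :=
  (List.range m).foldl (fun g c =>
    (List.range n).foldl (fun g r => pvWriteCell g (r + c) c (pvCh lines r c)) g) g

theorem inner_spec (lines : List String) (n w c : Nat) (hc : c < w) :
    ∀ (k : Nat) (g : List (List Char)), k ≤ n →
      g.length = w + n - 1 →
      (∀ R, ((g.getD R []).length = if R < w + n - 1 then w else 0)) →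
      (pvInner lines c k g).length = w + n - 1 ∧
      (∀ R, (((pvInner lines c k g).getD R []).length = if R < w + n - 1 then w else 0)) ∧
      (∀ R C, pvCell (pvInner lines c k g) R C =
        if C = c ∧ c ≤ R ∧ R - c < k then pvCh lines (R - c) c else pvCell g R C) := by
  intro k
  induction k with
  | zero => intro g _ hg hrow; refine ⟨hg, hrow, ?_⟩; intro R C; simp [pvInner]
  | succ k ih =>
    intro g hk hg hrow
    obtain ⟨ih1, ih2, ih3⟩ := ih g (by omega) hg hrow
    have hstep : pvInner lines c (k+1) g =
        pvWriteCell (pvInner lines c k g) (k + c) c (pvCh lines k c) := by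
      simp [pvInner, List.range_succ]
    have hi : k + c < (pvInner lines c k g).length := by rw [ih1]; omega
    have hj : c < ((pvInner lines c k g).getD (k + c) []).length := by
      rw [ih2 (k + c), if_pos (by omega : k + c < w + n - 1)]; omega
    refine ⟨?_, ?_, ?_⟩
    · rw [hstep, length_writeCell, ih1]
    · intro R; rw [hstep, rowlen_writeCell, ih2]
    · intro R C
      rw [hstep, cell_writeCell _ _ _ _ _ _ hi hj, ih3]
      split_ifs with h1 h3 h2 h3 h3
      · obtain ⟨e1, e2⟩ := h1; subst e1; subst e2; congr 1; omega
      · obtain ⟨e1, e2⟩ := h1; exact absurd ⟨e2, by omega, by omega⟩ h3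
      · rfl
      · obtain ⟨e1, e2, e3⟩ := h2; exact absurd ⟨e1, e2, by omega⟩ h3
      · obtain ⟨e1, e2, e3⟩ := h3; exact absurd ⟨by omega, e1⟩ h1
      · rfl

theorem outer_spec (lines : List String) (n w : Nat) :
    ∀ (m : Nat) (g : List (List Char)), m ≤ w →
      g.length = w + n - 1 →
      (∀ R, ((g.getD R []).length = if R < w + n - 1 then w else 0)) →
      (pvOuter lines n w m g).length = w + n - 1 ∧
      (∀ R, (((pvOuter lines n w m g).getD R []).length = if R < w + n - 1 then w else 0)) ∧
      (∀ R C, pvCell (pvOuter lines n w m g) R C =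
        if C < m ∧ C ≤ R ∧ R - C < n then pvCh lines (R - C) C else pvCell g R C) := by
  intro m
  induction m with
  | zero => intro g _ hg hrow; refine ⟨hg, hrow, ?_⟩; intro R C; simp [pvOuter]
  | succ m ih =>
    intro g hm hg hrow
    obtain ⟨ih1, ih2, ih3⟩ := ih g (by omega) hg hrow
    have hstep : pvOuter lines n w (m+1) g = pvInner lines m n (pvOuter lines n w m g) := by
      simp [pvOuter, pvInner, List.range_succ]
    obtain ⟨j1, j2, j3⟩ := inner_spec lines n w m (by omega) n (pvOuter lines n w m g)
      le_rfl ih1 ih2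
    rw [hstep]
    refine ⟨j1, j2, ?_⟩
    intro R C
    rw [j3, ih3]
    split_ifs with h1 h3 h2 h3 h3
    · obtain ⟨e1, e2, e3⟩ := h1; subst e1; rfl
    · obtain ⟨e1, e2, e3⟩ := h1; exact absurd ⟨by omega, by omega, by omega⟩ h3
    · rfl
    · obtain ⟨e1, e2, e3⟩ := h2; exact absurd ⟨by omega, by omega, by omega⟩ h3
    · obtain ⟨e1, e2, e3⟩ := h3
      rcases Nat.lt_succ_iff_lt_or_eq.mp e1 with h | h
      · exact absurd ⟨h, e2, e3⟩ h2
      · exact absurd ⟨h, by omega, by omega⟩ h1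
    · rfl

theorem initrow (w n : Nat) (R : Nat) :
    ((List.replicate (w + n - 1) (List.replicate w (' ' : Char))).getD R []).length
      = if R < w + n - 1 then w else 0 := by
  rw [List.getD_eq_getElem?_getD, List.getElem?_replicate]
  split_ifs with h
  · simp
  · rfl

theorem initcell (w n : Nat) (R C : Nat) :
    pvCell (List.replicate (w + n - 1) (List.replicate w ' ')) R C = ' ' := by
  unfold pvCell
  simp only [List.getD_eq_getElem?_getD, List.getElem?_replicate]
  split_ifs with h
  · simp only [Option.getD_some, List.getElem?_replicate]
    split_ifs <;> rfl
  · rfl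

theorem rotate_45_spec_aux (lines : List String) (hne : ¬ lines.length = 0) :
    rotate_45 lines = rotate_45_alt lines := by
  have key : ∀ (n w : Nat), n = lines.length → w = (lines.headD "").toList.length →
      ((List.range w).foldl (fun g c =>
          (List.range n).foldl (fun g r =>
            pvWriteCell g (r + c) c ((lines.getD r "").toList.getD c ' ')) g)
        (List.replicate (w + n - 1) (List.replicate w ' '))).map
          (fun chars => String.ofList chars)
      = (List.range (w + n - 1)).map (fun R =>
          String.ofList ((List.range w).map (fun C =>
            if C ≤ R ∧ R - C < n then (lines.getD (R - C) "").toList.getD C ' ' else ' '))) := by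
    intro n w hn hw
    obtain ⟨f1, f2, f3⟩ := outer_spec lines n w w
      (List.replicate (w + n - 1) (List.replicate w ' ')) le_rfl
      (by simp) (initrow w n)
    have hfold : (List.range w).foldl (fun g c =>
          (List.range n).foldl (fun g r =>
            pvWriteCell g (r + c) c ((lines.getD r "").toList.getD c ' ')) g)
        (List.replicate (w + n - 1) (List.replicate w ' '))
        = pvOuter lines n w w (List.replicate (w + n - 1) (List.replicate w ' ')) := rfl
    set init : List (List Char) := List.replicate (w + n - 1) (List.replicate w ' ') with hinit
    set G := pvOuter lines n w w init with hG
    rw [hfold]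
    apply List.ext_getElem
    · simp [f1]
    · intro R h1 h2
      simp only [List.getElem_map, List.getElem_range]
      have hR : R < w + n - 1 := by rw [List.length_map, f1] at h1; exact h1
      congr 1
      have hrowlen : (G.getD R []).length = w := by rw [f2 R, if_pos hR]
      have hRG : R < G.length := by rw [f1]; omega
      have hrowget : G.getD R [] = G[R]'hRG := by
        rw [List.getD_eq_getElem?_getD, List.getElem?_eq_getElem hRG]; rfl
      apply List.ext_getElem
      · rw [← hrowget, hrowlen]; simp
      · intro C hC1 hC2
        simp only [List.getElem_map, List.getElem_range]
        have hCw : C < w := by simpa using hC2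
        have hCrow : C < (G[R]'hRG).length := by rw [← hrowget, hrowlen]; exact hCw
        have hcell' : pvCell G R C = (G[R]'hRG)[C]'hCrow := by
          unfold pvCell
          rw [hrowget, List.getD_eq_getElem?_getD, List.getElem?_eq_getElem hCrow]; rfl
        rw [← hcell', f3 R C, initcell]
        split_ifs with h1 h2 h2
        · rfl
        · exact absurd ⟨h1.2.1, h1.2.2⟩ h2
        · exact absurd ⟨hCw, h2.1, h2.2⟩ h1
        · rfl
  simp only [rotate_45, rotate_45_alt, if_neg hne]
  exact key lines.length ((lines.headD "").toList.length) rfl rfl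

-- ===== VERDICT (by name: the statement is the Claim_ definition above) =====
theorem rotate_45_spec : Claim_equal_rotate_45 := by
  intro lines _ _
  unfold Spec_rotate_45
  by_cases h : lines.length = 0
  · unfold rotate_45 rotate_45_alt
    rw [if_pos h, if_pos h]
  · exact rotate_45_spec_aux lines h
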